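-- pv_equiv track=rewrite | github.com/shasha55055/Carvana | Main.py | mostCommonSequence
-- ===== SOURCE A (Python) =====
-- def mostCommonSequence(hashmap, hashmap2):
--     num_arr = []
--     for key in hashmap2:
--         num_arr.append(key)
--     num_arr.sort()
--     num_arr = num_arr[::-1]
--
--     final_size = 0
--     if len(hashmap) > 100:
--         final_size = 100
--     else:
--         final_size = len(hashmap)
--
--     final_arr = []
--     for key in num_arr:
--         for string in hashmap2[key]:
--             final_arr.append(string + " - " + str(key))
--     final_arr = final_arr[0:final_size]
--
--     return(final_arr)
-- ===== SOURCE B (Python) =====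
-- def mostCommonSequence(hashmap, hashmap2):
--     # incrementally insert each dict item into a list kept ordered by count descending,
--     # finding the insertion point by hand-written binary search (stable: after equal counts)
--     ordered = []
--     for item in hashmap2.items():
--         lo, hi = 0, len(ordered)
--         while lo < hi:
--             mid = (lo + hi) // 2
--             if ordered[mid][0] >= item[0]:
--                 lo = mid + 1
--             else:
--                 hi = mid
--         ordered.insert(lo, item)
--     out = []
--     for count, strings in ordered:
--         for s in strings:
--             out.append(s + " - " + str(count))
--     return out[:min(100, len(hashmap))]
-- ===== Notes on version B (the rewrite author's own statement) =====
-- stated objective: alternative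
-- what changed: B never calls sort and never looks keys up in the dict: it builds a descending-ordered list of (count, strings) items incrementally, locating each insertion point with a hand-written binary search and splicing the item in, then flattens that list once and truncates with min(100, len(hashmap)) instead of A's sort-keys/reverse/nested-lookup-loop/if-else-slice.
import Mathlib
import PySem

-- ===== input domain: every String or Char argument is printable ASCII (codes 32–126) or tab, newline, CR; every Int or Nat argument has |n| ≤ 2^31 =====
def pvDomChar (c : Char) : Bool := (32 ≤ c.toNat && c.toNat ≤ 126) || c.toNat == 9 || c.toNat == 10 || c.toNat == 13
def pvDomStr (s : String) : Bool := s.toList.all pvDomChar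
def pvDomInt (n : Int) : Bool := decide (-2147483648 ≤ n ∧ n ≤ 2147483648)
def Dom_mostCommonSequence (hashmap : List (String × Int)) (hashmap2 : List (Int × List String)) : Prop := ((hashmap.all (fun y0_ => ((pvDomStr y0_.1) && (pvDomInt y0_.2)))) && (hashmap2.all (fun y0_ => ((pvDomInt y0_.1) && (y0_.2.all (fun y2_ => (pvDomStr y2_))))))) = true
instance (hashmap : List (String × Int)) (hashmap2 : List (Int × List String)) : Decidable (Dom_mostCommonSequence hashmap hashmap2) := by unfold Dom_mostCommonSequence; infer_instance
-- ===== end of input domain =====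

-- B replaces A's sort-keys/reverse/nested-dict-lookup loop by incremental binary-search insertion of the
-- dict items into a descending-ordered accumulator (no sort call, no lookup), one flatten, take min(100, len) — objective: alternative.


-- ===== PORT A =====
def mostCommonSequence (hashmap : List (String × Int)) (hashmap2 : List (Int × List String)) : List String :=
  -- num_arr = []; for key in hashmap2: num_arr.append(key)
  let num_arr : List Int := hashmap2.foldl (fun acc kv => acc ++ [kv.1]) []
  -- num_arr.sort()
  let num_arr := PySem.List.sorted num_arr (fun x => x) false
  -- num_arr = num_arr[::-1]   (step -1 is never 0, so slice? is always some)
  let num_arr := (PySem.List.slice? num_arr none none (-1)).getD []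
  -- final_size = 100 if len(hashmap) > 100 else len(hashmap)
  let final_size : Int := if (hashmap.length : Int) > 100 then 100 else (hashmap.length : Int)
  -- for key in num_arr: for string in hashmap2[key]: final_arr.append(string + " - " + str(key))
  -- (every key iterated comes from hashmap2, so the dict lookup hashmap2[key] never raises; ported as getD)
  let final_arr : List String := num_arr.foldl
    (fun acc key =>
      ((PySem.Dict.mk hashmap2).getD key []).foldl
        (fun acc s => acc ++ [s ++ " - " ++ PySem.Int.toStr key]) acc) []
  -- final_arr[0:final_size]
  PySem.List.slice final_arr (some 0) (some final_size)

-- ===== PORT B =====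
-- lo, hi = 0, len(ordered); while lo < hi: mid = (lo+hi)//2; if ordered[mid][0] >= item[0]: lo = mid+1 else: hi = mid
-- (lo, hi, mid are always Nats with mid < len(ordered), so Nat arithmetic and getD-indexing are exact here)
def pvBS (c : Int) (l : List (Int × List String)) (lo hi : Nat) : Nat :=
  if lo < hi then
    let mid := (lo + hi) / 2
    if c ≤ (l.getD mid (0, [])).1 then pvBS c l (mid + 1) hi else pvBS c l lo mid
  else lo
termination_by hi - lo
decreasing_by all_goals omega

def mostCommonSequence_alt (hashmap : List (String × Int)) (hashmap2 : List (Int × List String)) : List String :=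
  -- for item in hashmap2.items(): <binary search>; ordered.insert(lo, item)
  -- (list.insert at index lo with 0 ≤ lo ≤ len(ordered) is exactly the take/drop splice — exact here)
  let ordered : List (Int × List String) := hashmap2.foldl
    (fun acc item =>
      let i := pvBS item.1 acc 0 acc.length
      acc.take i ++ item :: acc.drop i) []
  -- for count, strings in ordered: for s in strings: out.append(s + " - " + str(count))
  let out : List String := ordered.foldl
    (fun acc kv => kv.2.foldl (fun acc s => acc ++ [s ++ " - " ++ PySem.Int.toStr kv.1]) acc) []
  -- out[:min(100, len(hashmap))]
  out.take (min 100 hashmap.length)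

-- ===== PRECONDITION & SPEC =====
-- Pre_ excludes association lists with duplicate keys (in either dict argument): the Python function
-- receives real dicts, where duplicate keys cannot occur (they collapse on construction), so the
-- assoc-list representation with a repeated key does not denote any Python input.
def Pre_mostCommonSequence (hashmap : List (String × Int)) (hashmap2 : List (Int × List String)) : Prop :=
  (hashmap.map Prod.fst).Nodup ∧ (hashmap2.map Prod.fst).Nodup
instance (hashmap : List (String × Int)) (hashmap2 : List (Int × List String)) : Decidable (Pre_mostCommonSequence hashmap hashmap2) := by unfold Pre_mostCommonSequence; infer_instance

def pvWitness_mostCommonSequence : (List (String × Int)) × (List (Int × List String)) :=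
  ([("a", 1), ("b", 2)], [(1, ["x"]), (2, ["y", "z"])])

def Spec_mostCommonSequence (hashmap : List (String × Int)) (hashmap2 : List (Int × List String)) (out : List String) : Prop := out = mostCommonSequence_alt hashmap hashmap2
instance (hashmap : List (String × Int)) (hashmap2 : List (Int × List String)) (out : List String) : Decidable (Spec_mostCommonSequence hashmap hashmap2 out) := by unfold Spec_mostCommonSequence; infer_instance

-- ===== CLAIM (what is proved, stated in full; the proofs are below) =====
def Claim_equal_mostCommonSequence : Prop := ∀ (hashmap : List (String × Int)) (hashmap2 : List (Int × List String)), Dom_mostCommonSequence hashmap hashmap2 → Pre_mostCommonSequence hashmap hashmap2 → Spec_mostCommonSequence hashmap hashmap2 (mostCommonSequence hashmap hashmap2)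

-- ===== LEMMAS AND PROOFS =====

-- the linear characterisation of the insertion point: length of the leading run with count ≥ c
def pvInsIdx (c : Int) : List (Int × List String) → Nat
  | [] => 0
  | x :: xs => if c ≤ x.1 then pvInsIdx c xs + 1 else 0

theorem insIdx_le_length (c : Int) (l : List (Int × List String)) : pvInsIdx c l ≤ l.length := by
  induction l with
  | nil => simp [pvInsIdx]
  | cons y ys ih =>
    by_cases h : c ≤ y.1
    · simp only [pvInsIdx, h, if_true, List.length_cons]; omega
    · simp [pvInsIdx, h]

theorem insIdx_spec_lt (c : Int) (l : List (Int × List String)) :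
    ∀ j < pvInsIdx c l, c ≤ (l.getD j (0, [])).1 := by
  induction l with
  | nil => simp [pvInsIdx]
  | cons y ys ih =>
    intro j hj
    by_cases h : c ≤ y.1
    · cases j with
      | zero => simpa using h
      | succ j' =>
        simp only [pvInsIdx, h, if_true] at hj
        simpa using ih j' (by omega)
    · simp [pvInsIdx, h] at hj

theorem insIdx_spec_at (c : Int) (l : List (Int × List String))
    (h : pvInsIdx c l < l.length) : (l.getD (pvInsIdx c l) (0, [])).1 < c := by
  induction l with
  | nil => simp [pvInsIdx] at h
  | cons y ys ih =>
    by_cases hc : c ≤ y.1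
    · simp only [pvInsIdx, hc, if_true] at h ⊢
      simpa using ih (by simpa using h)
    · simpa [pvInsIdx, hc] using lt_of_not_ge hc

-- descending lists: elements never increase with the index
theorem desc_getD_le (l : List (Int × List String))
    (hd : List.Pairwise (fun a b : Int × List String => b.1 ≤ a.1) l)
    (i j : Nat) (hij : i ≤ j) (hj : j < l.length) :
    (l.getD j (0, [])).1 ≤ (l.getD i (0, [])).1 := by
  rcases eq_or_lt_of_le hij with rfl | hlt
  · exact le_refl _
  · have := (List.pairwise_iff_getElem.mp hd) i j (by omega) hj hlt
    simpa [List.getD_eq_getElem, hj, (by omega : i < l.length)] using this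

-- on a descending list the binary search finds exactly the linear insertion point
theorem bs_eq_insIdx (c : Int) (l : List (Int × List String))
    (hd : List.Pairwise (fun a b : Int × List String => b.1 ≤ a.1) l) :
    ∀ n lo hi, hi - lo ≤ n → lo ≤ hi → hi ≤ l.length →
      (∀ j < lo, c ≤ (l.getD j (0, [])).1) →
      (∀ j, hi ≤ j → j < l.length → (l.getD j (0, [])).1 < c) →
      pvBS c l lo hi = pvInsIdx c l := by
  intro n
  induction n with
  | zero =>
    intro lo hi hn hlohi hhi hbelow habove
    have heq : lo = hi := by omega
    subst heq
    rw [pvBS]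
    simp only [lt_irrefl, if_false]
    by_contra hne
    rcases Nat.lt_or_ge (pvInsIdx c l) lo with hl | hg
    · have h1 : c ≤ (l.getD (pvInsIdx c l) (0, [])).1 := hbelow _ hl
      have h2 := insIdx_spec_at c l (by omega)
      omega
    · have hlo : lo < pvInsIdx c l := by omega
      have h1 : c ≤ (l.getD lo (0, [])).1 := insIdx_spec_lt c l lo hlo
      have h2 : (l.getD lo (0, [])).1 < c :=
        habove lo (le_refl _) (by have := insIdx_le_length c l; omega)
      omega
  | succ n ih =>
    intro lo hi hn hlohi hhi hbelow habove
    rw [pvBS]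
    by_cases hlt : lo < hi
    · simp only [hlt, if_true]
      have hmid1 : lo ≤ (lo + hi) / 2 := by omega
      have hmid2 : (lo + hi) / 2 < hi := by omega
      by_cases hc : c ≤ (l.getD ((lo + hi) / 2) (0, [])).1
      · simp only [hc, if_true]
        exact ih _ _ (by omega) (by omega) hhi
          (fun j hj => le_trans hc (desc_getD_le l hd j _ (by omega) (by omega)))
          habove
      · simp only [hc, if_false]
        exact ih _ _ (by omega) (by omega) (by omega) hbelow
          (fun j hmj hj => lt_of_le_of_lt (desc_getD_le l hd _ j hmj hj) (lt_of_not_ge hc))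
    · simp only [hlt, if_false]
      have heq : lo = hi := by omega
      subst heq
      by_contra hne
      rcases Nat.lt_or_ge (pvInsIdx c l) lo with hl | hg
      · have h1 : c ≤ (l.getD (pvInsIdx c l) (0, [])).1 := hbelow _ hl
        have h2 := insIdx_spec_at c l (by omega)
        omega
      · have hlo : lo < pvInsIdx c l := by omega
        have h1 : c ≤ (l.getD lo (0, [])).1 := insIdx_spec_lt c l lo hlo
        have h2 : (l.getD lo (0, [])).1 < c :=
          habove lo (le_refl _) (by have := insIdx_le_length c l; omega)
        omega

-- B's splice at the linear insertion point is PySem's insertBy step for the descending-by-key order.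
theorem splice_insIdx_eq_insertBy (p : Int × List String) (l : List (Int × List String)) :
    l.take (pvInsIdx p.1 l) ++ p :: l.drop (pvInsIdx p.1 l)
      = PySem.List.insertBy (fun a b => decide (b.1 < a.1)) p l := by
  induction l with
  | nil => simp [pvInsIdx, PySem.List.insertBy]
  | cons y ys ih =>
    by_cases h : p.1 ≤ y.1
    · simp [pvInsIdx, h, PySem.List.insertBy, not_lt.mpr h, ih]
    · simp [pvInsIdx, h, PySem.List.insertBy, lt_of_not_ge h]

-- the insertBy step keeps the accumulator descending
theorem insertBy_desc (p : Int × List String) (l : List (Int × List String))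
    (hd : List.Pairwise (fun a b : Int × List String => b.1 ≤ a.1) l) :
    List.Pairwise (fun a b : Int × List String => b.1 ≤ a.1)
      (PySem.List.insertBy (fun a b => decide (b.1 < a.1)) p l) := by
  induction l with
  | nil => simp [PySem.List.insertBy]
  | cons y ys ih =>
    rcases List.pairwise_cons.mp hd with ⟨hy, hys⟩
    by_cases h : y.1 < p.1
    · simp only [PySem.List.insertBy, h, decide_true, if_true]
      refine List.pairwise_cons.mpr ⟨?_, hd⟩
      intro z hz
      rcases List.mem_cons.mp hz with rfl | hz
      · exact le_of_lt h
      · exact le_trans (hy z hz) (le_of_lt h)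
    · simp only [PySem.List.insertBy, h, decide_false, Bool.false_eq_true, if_false]
      refine List.pairwise_cons.mpr ⟨?_, ih hys⟩
      intro z hz
      rcases (PySem.List.mem_insertBy _ _ _ _).mp hz with rfl | hz
      · exact le_of_not_gt h
      · exact hy z hz

-- hence B's accumulator is exactly sorted(items, key=fst, reverse=True)
theorem ordered_eq_sorted (hashmap2 : List (Int × List String)) :
    hashmap2.foldl (fun acc item =>
        acc.take (pvBS item.1 acc 0 acc.length) ++ item :: acc.drop (pvBS item.1 acc 0 acc.length)) []
      = PySem.List.sorted hashmap2 (fun kv => kv.1) true := by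
  rw [PySem.List.sorted_rev_eq_foldl_insertBy]
  suffices h : ∀ (l : List (Int × List String)) (acc : List (Int × List String)),
      List.Pairwise (fun a b : Int × List String => b.1 ≤ a.1) acc →
      l.foldl (fun acc item =>
        acc.take (pvBS item.1 acc 0 acc.length) ++ item :: acc.drop (pvBS item.1 acc 0 acc.length)) acc
      = l.foldl (fun acc x => PySem.List.insertBy (fun a b => decide (b.1 < a.1)) x acc) acc by
    exact h hashmap2 [] (List.Pairwise.nil)
  intro l
  induction l with
  | nil => intro acc _; rfl
  | cons p ps ih =>
    intro acc hd
    have hstep : acc.take (pvBS p.1 acc 0 acc.length) ++ p :: acc.drop (pvBS p.1 acc 0 acc.length)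
        = PySem.List.insertBy (fun a b => decide (b.1 < a.1)) p acc := by
      rw [bs_eq_insIdx p.1 acc hd acc.length 0 acc.length (by omega) (by omega) (le_refl _)
        (by omega) (by omega)]
      exact splice_insIdx_eq_insertBy p acc
    simp only [List.foldl_cons, hstep]
    exact ih _ (insertBy_desc p acc hd)

-- the sorted items list, written as A's descending key list paired with the dict lookup.
theorem sorted_items_eq_desc_keys_map (hashmap2 : List (Int × List String))
    (hnd : (hashmap2.map Prod.fst).Nodup) :
    PySem.List.sorted hashmap2 (fun kv => kv.1) true
      = ((PySem.List.sorted (hashmap2.map Prod.fst) (fun x => x) false).reverse).map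
          (fun k => (k, (PySem.Dict.mk hashmap2).getD k [])) := by
  set ks := hashmap2.map Prod.fst with hks
  have hperm : (PySem.List.sorted ks (fun x => x) false).Perm ks :=
    PySem.List.sorted_perm ks (fun x => x) false
  have hpermrev : ((PySem.List.sorted ks (fun x => x) false).reverse).Perm ks :=
    (List.reverse_perm _).trans hperm
  apply PySem.List.sorted_rev_eq_of_perm_of_pairwise_gt
  · have hitems : hashmap2 = ks.map (fun k => (k, (PySem.Dict.mk hashmap2).getD k [])) := by
      have := PySem.Dict.items_eq_map_keys (PySem.Dict.mk hashmap2) (by simpa using hnd) []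
      simpa [hks, PySem.Dict.items, PySem.Dict.keys, List.map_map, Function.comp] using this
    calc (List.map (fun k => (k, (PySem.Dict.mk hashmap2).getD k []))
            (PySem.List.sorted ks (fun x => x) false).reverse).Perm
          (ks.map (fun k => (k, (PySem.Dict.mk hashmap2).getD k []))) := hpermrev.map _
      _ = hashmap2 := hitems.symm
  · have hnodup : (PySem.List.sorted ks (fun x => x) false).Nodup := hperm.symm.nodup hnd
    have hle : List.Pairwise (fun a b => a ≤ b) (PySem.List.sorted ks (fun x => x) false) :=
      PySem.List.sorted_pairwise ks (fun x => x)
    have hlt : List.Pairwise (fun a b : Int => a < b) (PySem.List.sorted ks (fun x => x) false) := by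
      have := hle.and hnodup
      exact this.imp (fun h => lt_of_le_of_ne h.1 h.2)
    simpa [List.pairwise_map, List.pairwise_reverse] using hlt

-- the truncation sizes agree
theorem final_size_eq (n : Nat) :
    (if ((n : Int) > 100) then (100 : Int) else (n : Int)) = ((min 100 n : Nat) : Int) := by
  split <;> omega

-- ===== VERDICT (by name: the statement is the Claim_ definition above) =====
theorem mostCommonSequence_spec : Claim_equal_mostCommonSequence := by
  intro hashmap hashmap2 _ hpre
  obtain ⟨_, hnd2⟩ := hpre
  unfold Spec_mostCommonSequence mostCommonSequence mostCommonSequence_alt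
  simp only [PySem.List.foldl_append_singleton_eq_map, List.nil_append,
    PySem.List.slice?_none_none_neg_one, Option.getD_some]
  rw [ordered_eq_sorted, sorted_items_eq_desc_keys_map hashmap2 hnd2]
  have hflat : ∀ (l : List (Int × List String)),
      List.foldl (fun acc kv => acc ++ kv.2.map (fun s => s ++ " - " ++ PySem.Int.toStr kv.1)) [] l
      = l.flatMap (fun kv => kv.2.map (fun s => s ++ " - " ++ PySem.Int.toStr kv.1)) := fun l => by
    simpa using PySem.List.foldl_append_eq_flatMap
      (fun kv : Int × List String => kv.2.map (fun s => s ++ " - " ++ PySem.Int.toStr kv.1)) l []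
  have hflat2 : ∀ (l : List Int),
      List.foldl (fun acc key => acc ++ List.map (fun x => x ++ " - " ++ PySem.Int.toStr key)
        ((PySem.Dict.mk hashmap2).getD key [])) [] l
      = l.flatMap (fun key => List.map (fun x => x ++ " - " ++ PySem.Int.toStr key)
        ((PySem.Dict.mk hashmap2).getD key [])) := fun l => by
    simpa using PySem.List.foldl_append_eq_flatMap
      (fun key => List.map (fun x => x ++ " - " ++ PySem.Int.toStr key)
        ((PySem.Dict.mk hashmap2).getD key [])) l []
  rw [hflat, hflat2]
  rw [final_size_eq, PySem.List.slice_zero_start, PySem.List.slice_to_natCast]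
  simp [-List.map_reverse, List.flatMap_map]
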